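-- pv_equiv track=rewrite | github.com/jmd-jude/box-index-app | python/depo_experiment.py | deduplicate_topics
-- ===== SOURCE A (Python) =====
-- def deduplicate_topics(rows):
--     """
--     Merge adjacent entries with nearly identical subjects (first 30 chars,
--     case-insensitive). Keeps the first, extends page_range_end if later end
--     is larger.
--     """
--     if not rows:
--         return rows
--     merged = [rows[0]]
--     for row in rows[1:]:
--         prev = merged[-1]
--         if (
--             prev["subject"].lower()[:30]
--             and prev["subject"].lower()[:30] == row["subject"].lower()[:30]
--         ):
--             try:
--                 prev_end = int(prev.get("page_range_end") or prev["page_num"])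
--                 curr_end = int(row.get("page_range_end") or row["page_num"])
--                 if curr_end > prev_end:
--                     prev["page_range_end"] = str(curr_end)
--             except (ValueError, TypeError):
--                 pass
--         else:
--             merged.append(row)
--     return merged
-- ===== SOURCE B (Python) =====
-- def _subject_key(row):
--     return row["subject"].lower()[:30]
--
--
-- def _merge_end(first, row):
--     try:
--         prev_end = int(first.get("page_range_end") or first["page_num"])
--         curr_end = int(row.get("page_range_end") or row["page_num"])
--         if curr_end > prev_end:
--             first["page_range_end"] = str(curr_end)
--     except (ValueError, TypeError):
--         pass
--
--
-- def deduplicate_topics(rows):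
--     if len(rows) < 2:
--         return rows
--     # Pass 1: partition into runs of consecutive rows sharing the same
--     # nonempty subject key (empty-key rows are always singleton runs).
--     runs = []
--     for row in rows:
--         k = _subject_key(row)
--         if k and runs and runs[-1][0] == k:
--             runs[-1][1].append(row)
--         else:
--             runs.append((k, [row]))
--     # Pass 2: each run collapses to its first row, extended by the later ends.
--     out = []
--     for _, members in runs:
--         first = members[0]
--         for row in members[1:]:
--             _merge_end(first, row)
--         out.append(first)
--     return out
-- ===== Notes on version B (the rewrite author's own statement) =====
-- stated objective: alternative
-- what changed: B replaces A's single pass that mutates the last element of a growing 'merged' list (re-checking the subject prefix against the run head on every iteration) by a two-pass decomposition: pass 1 partitions the rows into runs of consecutive rows sharing the same nonempty lowercase 30-char subject key (computed once per row; empty keys give singleton runs), pass 2 collapses each run to its first row, folding the remaining members' page ends into it unconditionally.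
import Mathlib
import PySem

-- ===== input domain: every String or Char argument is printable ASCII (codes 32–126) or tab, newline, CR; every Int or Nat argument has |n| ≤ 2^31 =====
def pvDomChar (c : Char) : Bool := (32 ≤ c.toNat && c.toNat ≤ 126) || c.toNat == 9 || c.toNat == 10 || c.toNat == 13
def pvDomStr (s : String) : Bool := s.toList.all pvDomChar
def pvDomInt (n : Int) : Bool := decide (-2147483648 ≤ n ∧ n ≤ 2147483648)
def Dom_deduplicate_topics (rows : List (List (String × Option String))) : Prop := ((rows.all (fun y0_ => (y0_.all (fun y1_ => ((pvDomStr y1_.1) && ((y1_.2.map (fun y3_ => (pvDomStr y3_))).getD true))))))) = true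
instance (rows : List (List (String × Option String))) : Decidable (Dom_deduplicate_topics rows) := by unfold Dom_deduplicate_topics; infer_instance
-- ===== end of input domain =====

-- B restructures A's one-pass mutate-the-last-merged-row loop into a two-pass
-- run-partition + per-run fold (objective: alternative decomposition, same cost).
-- Both the Python A and B mutate the kept row dicts in place; the equivalence
-- proved here is about the RETURN value.

-- shared row primitives (row = one Python dict as an insertion-ordered assoc list)

-- row["subject"].lower()[:30]  (missing/None subject defaults to "" in the port; excluded by Pre_)
def pvSubjKey (row : List (String × Option String)) : List Char :=
  (PySem.Chars.lower ((((PySem.Dict.mk row).get? "subject").bind id).getD "").toList).take 30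

-- row.get("page_range_end") or row["page_num"]  (a missing "page_num" key yields none, i.e. is
-- treated like a None value; inside Pre_ the key is present whenever this falls through)
def pvEndStr (row : List (String × Option String)) : Option String :=
  match (PySem.Dict.mk row).get? "page_range_end" with
  | some (some s) => if s = "" then ((PySem.Dict.mk row).get? "page_num").bind id else some s
  | _ => ((PySem.Dict.mk row).get? "page_num").bind id

-- int(row.get("page_range_end") or row["page_num"]); none = ValueError/TypeError
def pvEnd (row : List (String × Option String)) : Option Int :=
  (pvEndStr row).bind PySem.Int.ofStr?

-- the try-block: extend prev's page_range_end if row's end parses and is larger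
def pvMergeEnd (prev row : List (String × Option String)) : List (String × Option String) :=
  match pvEnd prev, pvEnd row with
  | some pe, some ce =>
      if ce > pe then ((PySem.Dict.mk prev).insert "page_range_end" (some (PySem.Int.toStr ce))).items
      else prev
  | _, _ => prev

-- ===== PORT A =====
-- one pass; merged grows at the back, A reads/mutates merged[-1]; ported with the
-- reversed accumulator (head = merged[-1]) and a final reverse
def pvAStep (merged : List (List (String × Option String))) (row : List (String × Option String)) :
    List (List (String × Option String)) :=
  match merged with
  | [] => [row]  -- unreachable: the accumulator starts nonempty
  | prev :: t =>
      if pvSubjKey prev ≠ [] ∧ pvSubjKey prev = pvSubjKey row then pvMergeEnd prev row :: t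
      else row :: prev :: t

def deduplicate_topics (rows : List (List (String × Option String))) : List (List (String × Option String)) :=
  match rows with
  | [] => []
  | r0 :: rest => (rest.foldl pvAStep [r0]).reverse

-- ===== PORT B =====
-- pass 1 of Source B: runs of consecutive rows sharing the same nonempty key; reversed
-- accumulator of (key, reversed members), fixed up by pvFinalize
def pvRunStep (racc : List (List Char × List (List (String × Option String))))
    (row : List (String × Option String)) : List (List Char × List (List (String × Option String))) :=
  let k := pvSubjKey row
  match racc with
  | [] => [(k, [row])]
  | (k', mem) :: t => if k ≠ [] ∧ k' = k then (k', row :: mem) :: t else (k, [row]) :: (k', mem) :: t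

def pvFinalize (racc : List (List Char × List (List (String × Option String)))) :
    List (List Char × List (List (String × Option String))) :=
  racc.reverse.map (fun p => (p.1, p.2.reverse))

-- pass 2 of Source B: a run collapses to its first row with the later ends folded in
def pvCollapse (members : List (List (String × Option String))) : List (String × Option String) :=
  match members with
  | [] => []  -- unreachable: runs are nonempty
  | first :: restm => restm.foldl pvMergeEnd first

def deduplicate_topics_alt (rows : List (List (String × Option String))) : List (List (String × Option String)) :=
  if rows.length < 2 then rows
  else (pvFinalize (rows.foldl pvRunStep [])).map (fun p => pvCollapse p.2)

-- ===== PRECONDITION & SPEC =====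
-- Pre_ excludes (for 2 or more rows) inputs where some row has no string "subject" value
-- (A reads every subject and raises KeyError/AttributeError) and inputs where a row standing
-- next to an equal-nonempty-key neighbour — i.e. a row a merge can reach — has no end source
-- (no "page_num" key and falsy "page_range_end"): in merge position such a row raises
-- KeyError, except when an earlier caught ValueError/TypeError in the same run skips the
-- parse, where A still returns (the cited excluded example; A and B agree there).
def pvSubjOK (row : List (String × Option String)) : Bool :=
  (((PySem.Dict.mk row).get? "subject").bind id).isSome

def pvSrcOK (row : List (String × Option String)) : Bool :=
  ((PySem.Dict.mk row).get? "page_num").isSome ||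
    !(((((PySem.Dict.mk row).get? "page_range_end").bind id).getD "") == "")

def Pre_deduplicate_topics (rows : List (List (String × Option String))) : Prop :=
  rows.length < 2 ∨
    ((∀ row ∈ rows, pvSubjOK row = true) ∧
      ∀ p ∈ rows.zip rows.tail,
        (pvSubjKey p.1 ≠ [] ∧ pvSubjKey p.1 = pvSubjKey p.2) →
          pvSrcOK p.1 = true ∧ pvSrcOK p.2 = true)

instance (rows : List (List (String × Option String))) : Decidable (Pre_deduplicate_topics rows) := by
  unfold Pre_deduplicate_topics; infer_instance

def pvWitness_deduplicate_topics : (List (List (String × Option String))) :=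
  [[("subject", some "Alpha"), ("page_num", some "3")],
   [("subject", some "alpha"), ("page_num", some "7")]]

def Spec_deduplicate_topics (rows : List (List (String × Option String))) (out : List (List (String × Option String))) : Prop := out = deduplicate_topics_alt rows
instance (rows : List (List (String × Option String))) (out : List (List (String × Option String))) : Decidable (Spec_deduplicate_topics rows out) := by unfold Spec_deduplicate_topics; infer_instance

-- ===== CLAIM (what is proved, stated in full; the proofs are below) =====
def Claim_equal_deduplicate_topics : Prop := ∀ (rows : List (List (String × Option String))), Dom_deduplicate_topics rows → Pre_deduplicate_topics rows → Spec_deduplicate_topics rows (deduplicate_topics rows)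

-- ===== LEMMAS AND PROOFS =====

-- the run predicate: row belongs to the run opened with (nonempty) key k
def pvQ (k : List Char) (r : List (String × Option String)) : Bool :=
  decide (pvSubjKey r ≠ [] ∧ k = pvSubjKey r)

-- the common span-based characterisation of the runs
def pvRuns : List (List (String × Option String)) → List (List Char × List (List (String × Option String)))
  | [] => []
  | f :: rest =>
      (pvSubjKey f, f :: rest.takeWhile (pvQ (pvSubjKey f))) ::
        pvRuns (rest.dropWhile (pvQ (pvSubjKey f)))
termination_by l => l.length
decreasing_by
  have := List.length_dropWhile_le (pvQ (pvSubjKey f)) rest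
  simp; omega

theorem pvSubjKey_mergeEnd (prev row : List (String × Option String)) :
    pvSubjKey (pvMergeEnd prev row) = pvSubjKey prev := by
  cases hp : pvEnd prev <;> cases hr : pvEnd row
  all_goals simp only [pvMergeEnd, hp, hr]
  split
  · unfold pvSubjKey
    have hmk : ∀ (d : PySem.Dict String (Option String)), PySem.Dict.mk d.items = d := fun _ => rfl
    rw [hmk, PySem.Dict.get?_insert_of_ne _ _ (by decide)]
  · rfl

theorem pvSubjKey_foldl (run : List (List (String × Option String))) (f : List (String × Option String)) :
    pvSubjKey (run.foldl pvMergeEnd f) = pvSubjKey f := by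
  induction run generalizing f with
  | nil => rfl
  | cons r run ih => rw [List.foldl_cons, ih, pvSubjKey_mergeEnd]

theorem pv_dropWhile_head_false {α : Type} (p : α → Bool) (l : List α) (x : α) (xs : List α)
    (h : l.dropWhile p = x :: xs) : p x = false := by
  induction l with
  | nil => simp at h
  | cons a l ih =>
    rw [List.dropWhile_cons] at h
    split at h
    · exact ih h
    · next hp => cases h; simpa using hp

theorem pv_runA (run : List (List (String × Option String))) (f : List (String × Option String))
    (t : List (List (String × Option String)))
    (hq : ∀ r ∈ run, pvQ (pvSubjKey f) r = true) :
    List.foldl pvAStep (f :: t) run = run.foldl pvMergeEnd f :: t := by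
  induction run generalizing f with
  | nil => rfl
  | cons r run ih =>
    have h := hq r (List.mem_cons_self ..)
    simp only [pvQ, decide_eq_true_eq] at h
    rw [List.foldl_cons, show pvAStep (f :: t) r = pvMergeEnd f r :: t from by
      show (if pvSubjKey f ≠ [] ∧ pvSubjKey f = pvSubjKey r then pvMergeEnd f r :: t
            else r :: f :: t) = pvMergeEnd f r :: t
      rw [if_pos ⟨by rw [h.2]; exact h.1, h.2⟩]]
    rw [List.foldl_cons]
    exact ih (pvMergeEnd f r) fun r' hr' => by
      rw [pvSubjKey_mergeEnd]; exact hq r' (List.mem_cons_of_mem _ hr')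

theorem pv_mainA (n : Nat) : ∀ (rest : List (List (String × Option String))), rest.length ≤ n →
    ∀ (f : List (String × Option String)) (t : List (List (String × Option String))),
    List.foldl pvAStep (f :: t) rest
      = ((pvRuns (f :: rest)).map (fun p => pvCollapse p.2)).reverse ++ t := by
  induction n with
  | zero =>
    intro rest hlen f t
    have hnil : rest = [] := List.eq_nil_of_length_eq_zero (Nat.le_zero.mp hlen)
    subst hnil
    rw [pvRuns]
    simp [pvRuns, pvCollapse]
  | succ n ih =>
    intro rest hlen f t
    have hsplit := List.takeWhile_append_dropWhile (p := pvQ (pvSubjKey f)) (l := rest)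
    conv_lhs => rw [← hsplit]
    rw [List.foldl_append,
        pv_runA _ _ _ (fun r hr => List.mem_takeWhile_imp hr)]
    cases hd : rest.dropWhile (pvQ (pvSubjKey f)) with
    | nil =>
      rw [pvRuns, hd]
      simp [pvRuns, pvCollapse]
    | cons r' rest'' =>
      have hfalse : pvQ (pvSubjKey f) r' = false := pv_dropWhile_head_false _ _ _ _ hd
      have hkey : pvSubjKey ((rest.takeWhile (pvQ (pvSubjKey f))).foldl pvMergeEnd f) = pvSubjKey f :=
        pvSubjKey_foldl _ _
      have hlen2 : rest''.length ≤ n := by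
        have hle := List.length_dropWhile_le (pvQ (pvSubjKey f)) rest
        rw [hd] at hle
        simp only [List.length_cons] at hle
        omega
      rw [List.foldl_cons]
      rw [show pvAStep ((rest.takeWhile (pvQ (pvSubjKey f))).foldl pvMergeEnd f :: t) r'
            = r' :: (rest.takeWhile (pvQ (pvSubjKey f))).foldl pvMergeEnd f :: t from by
        show (if pvSubjKey ((rest.takeWhile (pvQ (pvSubjKey f))).foldl pvMergeEnd f) ≠ [] ∧
                 pvSubjKey ((rest.takeWhile (pvQ (pvSubjKey f))).foldl pvMergeEnd f) = pvSubjKey r'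
              then _ else _) = _
        rw [if_neg]
        intro hc
        rw [hkey] at hc
        have : pvQ (pvSubjKey f) r' = true := by
          simp only [pvQ, decide_eq_true_eq]
          exact ⟨by rw [← hc.2]; exact hc.1, hc.2⟩
        rw [hfalse] at this
        exact Bool.noConfusion this]
      rw [ih rest'' hlen2 r' _]
      conv_rhs => rw [pvRuns]
      rw [hd]
      simp [pvCollapse, List.append_assoc]

theorem pv_charA (rows : List (List (String × Option String))) :
    deduplicate_topics rows = (pvRuns rows).map (fun p => pvCollapse p.2) := by
  cases rows with
  | nil => rw [pvRuns]; rfl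
  | cons r0 rest =>
    show (rest.foldl pvAStep [r0]).reverse = _
    rw [show ([r0] : List (List (String × Option String))) = [r0] ++ [] from rfl,
        show (rest.foldl pvAStep ([r0] ++ [])) = rest.foldl pvAStep (r0 :: []) from rfl,
        pv_mainA rest.length rest (le_refl _) r0 []]
    simp

theorem pv_finalize_cons (k : List Char) (mem : List (List (String × Option String)))
    (t : List (List Char × List (List (String × Option String)))) :
    pvFinalize ((k, mem) :: t) = pvFinalize t ++ [(k, mem.reverse)] := by
  simp [pvFinalize]

theorem pv_mainB (rest : List (List (String × Option String))) :
    ∀ (k : List Char) (mem : List (List (String × Option String)))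
      (t : List (List Char × List (List (String × Option String)))),
    pvFinalize (List.foldl pvRunStep ((k, mem) :: t) rest)
      = pvFinalize t ++ ((k, mem.reverse ++ rest.takeWhile (pvQ k)) :: pvRuns (rest.dropWhile (pvQ k))) := by
  induction rest with
  | nil =>
    intro k mem t
    simp [pvRuns, pv_finalize_cons]
  | cons r rest' ih =>
    intro k mem t
    rw [List.foldl_cons]
    by_cases hq : pvSubjKey r ≠ [] ∧ k = pvSubjKey r
    · rw [show pvRunStep ((k, mem) :: t) r = (k, r :: mem) :: t from by
        show (if pvSubjKey r ≠ [] ∧ k = pvSubjKey r then _ else _) = _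
        rw [if_pos hq]]
      rw [ih]
      have hqt : pvQ k r = true := by simp only [pvQ, decide_eq_true_eq]; exact hq
      rw [List.takeWhile_cons_of_pos hqt, List.dropWhile_cons_of_pos hqt]
      simp
    · rw [show pvRunStep ((k, mem) :: t) r = (pvSubjKey r, [r]) :: (k, mem) :: t from by
        show (if pvSubjKey r ≠ [] ∧ k = pvSubjKey r then _ else _) = _
        rw [if_neg hq]]
      rw [ih]
      have hqf : pvQ k r = false := by
        simp only [pvQ, decide_eq_false_iff_not]
        exact hq
      rw [List.takeWhile_cons_of_neg (by rw [hqf]; exact Bool.false_ne_true),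
          List.dropWhile_cons_of_neg (by rw [hqf]; exact Bool.false_ne_true)]
      rw [pv_finalize_cons, pvRuns]
      simp [List.append_assoc]

theorem pv_charB (f : List (String × Option String)) (rest : List (List (String × Option String))) :
    pvFinalize (List.foldl pvRunStep [] (f :: rest)) = pvRuns (f :: rest) := by
  rw [List.foldl_cons, show pvRunStep [] f = [(pvSubjKey f, [f])] from rfl, pv_mainB, pvRuns]
  simp [pvFinalize]

-- ===== VERDICT (by name: the statement is the Claim_ definition above) =====
theorem deduplicate_topics_spec : Claim_equal_deduplicate_topics := by
  intro rows _ _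
  unfold Spec_deduplicate_topics deduplicate_topics_alt
  split
  · next h =>
    match rows, h with
    | [], _ => rfl
    | [r], _ => rfl
  · next h =>
    match rows, h with
    | f :: rest, _ =>
      rw [pv_charA, pv_charB]
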